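-- pv_equiv track=rewrite | github.com/Kaarlo-25/IACD-Practica1 | functions.py | evaluate_operators
-- ===== SOURCE A (Python) =====
-- valid_operators = ["!", "|", "&", ">", "="]
--
-- def evaluate_operators(operation_string, operator_index, proposition1_values, proposition2_values, partial_values):
--     if operation_string[operator_index] in valid_operators[1:]:
--         if operation_string[operator_index] == "&":
--             for i in range(len(proposition1_values)):
--                 if proposition1_values[i] == 1 and proposition2_values[i] == 1:
--                     partial_values.append(1)
--                 else:
--                     partial_values.append(0)
--
--         elif operation_string[operator_index] == "|":
--             for i in range(len(proposition1_values)):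
--                 if proposition1_values[i] == 1 or proposition2_values[i] == 1:
--                     partial_values.append(1)
--                 else:
--                     partial_values.append(0)
--
--         elif operation_string[operator_index] == ">":
--             for i in range(len(proposition1_values)):
--                 if proposition1_values[i] == 1 and proposition2_values[i] == 0:
--                     partial_values.append(0)
--                 else:
--                     partial_values.append(1)
--
--         elif operation_string[operator_index] == "=":
--             for i in range(len(proposition1_values)):
--                 if proposition1_values[i] == proposition2_values[i]:
--                     partial_values.append(1)
--                 else:
--                     partial_values.append(0)
--     return partial_values
-- ===== SOURCE B (Python) =====
-- def evaluate_operators(operation_string, operator_index, proposition1_values, proposition2_values, partial_values):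
--     op = operation_string[operator_index]
--     if op not in ('&', '|', '>', '='):
--         return partial_values
--
--     def combine(xs, ys):
--         if not xs:
--             return []
--         a, b = xs[0], ys[0]
--         if op == '=':
--             h = 1 if a == b else 0
--         elif op == '>':
--             h = 0 if (a, b) == (1, 0) else 1
--         elif op == '&':
--             h = 1 if (a, b) == (1, 1) else 0
--         else:
--             h = 1 if 1 in (a, b) else 0
--         return [h] + combine(xs[1:], ys[1:])
--
--     return partial_values + combine(proposition1_values, proposition2_values)
-- ===== Notes on version B (the rewrite author's own statement) =====
-- stated objective: alternative
-- what changed: A runs one of four index-based append loops mutating partial_values; B instead checks the operator once, then a recursive helper walks the two lists together by head/tail slicing (tuple-literal comparisons, '1 in (a,b)') building the fresh result list front-to-back, which is concatenated to partial_values without mutation.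
-- outside the precondition, e.g. on evaluate_operators('|', 0, [1], [], []): A returns [1], B raises IndexError
import Mathlib
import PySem

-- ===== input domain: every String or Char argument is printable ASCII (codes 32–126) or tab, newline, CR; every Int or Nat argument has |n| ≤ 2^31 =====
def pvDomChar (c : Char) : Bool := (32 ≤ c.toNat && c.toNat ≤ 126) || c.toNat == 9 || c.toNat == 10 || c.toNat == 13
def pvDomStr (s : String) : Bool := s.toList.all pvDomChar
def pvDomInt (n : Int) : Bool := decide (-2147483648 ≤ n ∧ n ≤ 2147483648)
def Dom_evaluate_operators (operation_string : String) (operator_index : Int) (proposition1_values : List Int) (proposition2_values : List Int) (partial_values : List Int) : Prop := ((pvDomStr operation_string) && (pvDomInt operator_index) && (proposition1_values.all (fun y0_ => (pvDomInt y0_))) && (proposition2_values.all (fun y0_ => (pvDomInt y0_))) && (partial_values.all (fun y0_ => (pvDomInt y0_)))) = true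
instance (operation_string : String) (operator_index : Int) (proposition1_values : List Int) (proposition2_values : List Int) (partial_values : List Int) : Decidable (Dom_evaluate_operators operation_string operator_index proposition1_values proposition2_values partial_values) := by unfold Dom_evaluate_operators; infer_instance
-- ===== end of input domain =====

-- B replaces A's four index-based append loops by one recursive walk over both lists together
-- building the result front-to-back (alternative decomposition, not faster). A mutates
-- partial_values in place (append), B does not; the equivalence is about the RETURN value only.

-- ===== PORT A =====
def evaluate_operators (operation_string : String) (operator_index : Int) (proposition1_values : List Int) (proposition2_values : List Int) (partial_values : List Int) : List Int :=
  match PySem.Str.pyGet? operation_string operator_index with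
  | none => partial_values  -- Python raises IndexError here; excluded by Pre_
  | some c =>
    if c = '|' ∨ c = '&' ∨ c = '>' ∨ c = '=' then  -- valid_operators[1:]
      if c = '&' then
        (PySem.List.pyRange 0 proposition1_values.length 1).foldl
          (fun acc i => if PySem.List.pyGetD proposition1_values i 0 = 1 ∧ PySem.List.pyGetD proposition2_values i 0 = 1
                        then acc ++ [1] else acc ++ [0]) partial_values
      else if c = '|' then
        (PySem.List.pyRange 0 proposition1_values.length 1).foldl
          (fun acc i => if PySem.List.pyGetD proposition1_values i 0 = 1 ∨ PySem.List.pyGetD proposition2_values i 0 = 1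
                        then acc ++ [1] else acc ++ [0]) partial_values
      else if c = '>' then
        (PySem.List.pyRange 0 proposition1_values.length 1).foldl
          (fun acc i => if PySem.List.pyGetD proposition1_values i 0 = 1 ∧ PySem.List.pyGetD proposition2_values i 0 = 0
                        then acc ++ [0] else acc ++ [1]) partial_values
      else if c = '=' then
        (PySem.List.pyRange 0 proposition1_values.length 1).foldl
          (fun acc i => if PySem.List.pyGetD proposition1_values i 0 = PySem.List.pyGetD proposition2_values i 0
                        then acc ++ [1] else acc ++ [0]) partial_values
      else partial_values
    else partial_values

-- ===== PORT B =====
-- Source B's recursive helper 'combine': walks xs head/tail (xs[1:], ys[1:] slices become the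
-- structural tails); ys[0] on empty ys would raise IndexError in Python — that case is outside
-- Pre_, ported as returning [] (exact on Pre_).
def pvCombine (op : Char) (xs ys : List Int) : List Int :=
  match xs, ys with
  | [], _ => []
  | _ :: _, [] => []  -- Python: ys[0] raises IndexError; excluded by Pre_
  | a :: xs', b :: ys' =>
    (if op = '=' then (if a = b then 1 else 0)
     else if op = '>' then (if (a, b) = ((1 : Int), (0 : Int)) then 0 else 1)
     else if op = '&' then (if (a, b) = ((1 : Int), (1 : Int)) then 1 else 0)
     else (if a = 1 ∨ b = 1 then 1 else 0)) :: pvCombine op xs' ys'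

def evaluate_operators_alt (operation_string : String) (operator_index : Int) (proposition1_values : List Int) (proposition2_values : List Int) (partial_values : List Int) : List Int :=
  match PySem.Str.pyGet? operation_string operator_index with
  | none => partial_values  -- Python raises IndexError here; excluded by Pre_
  | some op =>
    if op = '&' ∨ op = '|' ∨ op = '>' ∨ op = '=' then
      partial_values ++ pvCombine op proposition1_values proposition2_values
    else partial_values

-- ===== PRECONDITION & SPEC =====
-- Pre_ excludes inputs where operator_index is out of range (A raises IndexError) and, when the
-- selected char is an operator, those where proposition2_values is shorter than
-- proposition1_values: there A usually raises IndexError, but its short-circuiting 'and'/'or'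
-- can return without ever indexing proposition2_values, while B always reads both heads and
-- raises IndexError (see claim cites).
def Pre_evaluate_operators (operation_string : String) (operator_index : Int) (proposition1_values : List Int) (proposition2_values : List Int) (partial_values : List Int) : Prop :=
  PySem.Raise.InRange operation_string.toList.length operator_index ∧
  (PySem.Str.pyGet? operation_string operator_index ∈ ([some '|', some '&', some '>', some '='] : List (Option Char)) →
    proposition1_values.length ≤ proposition2_values.length)
instance (operation_string : String) (operator_index : Int) (proposition1_values : List Int) (proposition2_values : List Int) (partial_values : List Int) : Decidable (Pre_evaluate_operators operation_string operator_index proposition1_values proposition2_values partial_values) := by unfold Pre_evaluate_operators; infer_instance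

def pvWitness_evaluate_operators : String × Int × List Int × List Int × List Int := ("p&q", 1, [1, 0], [1, 1], [])

def Spec_evaluate_operators (operation_string : String) (operator_index : Int) (proposition1_values : List Int) (proposition2_values : List Int) (partial_values : List Int) (out : List Int) : Prop := out = evaluate_operators_alt operation_string operator_index proposition1_values proposition2_values partial_values
instance (operation_string : String) (operator_index : Int) (proposition1_values : List Int) (proposition2_values : List Int) (partial_values : List Int) (out : List Int) : Decidable (Spec_evaluate_operators operation_string operator_index proposition1_values proposition2_values partial_values out) := by unfold Spec_evaluate_operators; infer_instance

-- ===== CLAIM =====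
def Claim_equal_evaluate_operators : Prop := ∀ (operation_string : String) (operator_index : Int) (proposition1_values : List Int) (proposition2_values : List Int) (partial_values : List Int), Dom_evaluate_operators operation_string operator_index proposition1_values proposition2_values partial_values → Pre_evaluate_operators operation_string operator_index proposition1_values proposition2_values partial_values → Spec_evaluate_operators operation_string operator_index proposition1_values proposition2_values partial_values (evaluate_operators operation_string operator_index proposition1_values proposition2_values partial_values)

-- ===== LEMMAS AND PROOFS =====
-- A's loop body 'if P then acc ++ [v] else acc ++ [w]' as an append-of-map
theorem pv_fold_ite (P : Int → Prop) [DecidablePred P] (v w : Int) (l pv : List Int) :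
    l.foldl (fun acc i => if P i then acc ++ [v] else acc ++ [w]) pv
      = pv ++ l.map (fun i => if P i then v else w) := by
  induction l generalizing pv with
  | nil => simp
  | cons x xs ih => simp only [List.foldl_cons, ih]; split <;> simp_all

-- A's indexed map over range(len p1) is the elementwise zip when p2 is at least as long
theorem pv_map_range_getD (f : Int → Int → Int) (p1 p2 : List Int) (h : p1.length ≤ p2.length) :
    (List.range p1.length).map (fun k => f (p1.getD k 0) (p2.getD k 0)) = List.zipWith f p1 p2 := by
  induction p1 generalizing p2 with
  | nil => simp
  | cons a xs ih =>
    cases p2 with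
    | nil => simp at h
    | cons b ys =>
      simp only [List.length_cons]
      rw [List.range_succ_eq_map, List.map_cons, List.map_map]
      have hbody : ∀ k ∈ List.range xs.length,
          ((fun k => f ((a :: xs).getD k 0) ((b :: ys).getD k 0)) ∘ Nat.succ) k
            = f (xs.getD k 0) (ys.getD k 0) := by
        intro k _; simp [List.getD]
      rw [List.map_congr_left hbody, ih ys (by simpa using h)]
      simp [List.getD]

theorem pv_map_range_eq_zipWith (f : Int → Int → Int) (p1 p2 : List Int) (h : p1.length ≤ p2.length) :
    (PySem.List.pyRange 0 p1.length 1).map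
        (fun i => f (PySem.List.pyGetD p1 i 0) (PySem.List.pyGetD p2 i 0))
      = List.zipWith f p1 p2 := by
  rw [PySem.List.pyRange_one, List.map_map]
  have hbody : ∀ k ∈ List.range (((p1.length : Int) - 0).toNat),
      ((fun i => f (PySem.List.pyGetD p1 i 0) (PySem.List.pyGetD p2 i 0)) ∘ (fun k : Nat => (0 : Int) + k)) k
        = f (p1.getD k 0) (p2.getD k 0) := by
    intro k _; simp
  rw [List.map_congr_left hbody]
  have : ((p1.length : Int) - 0).toNat = p1.length := by omega
  rw [this, pv_map_range_getD f p1 p2 h]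

-- B's recursive walk is the same zip
theorem pv_combine_eq_zipWith (op : Char) (p1 p2 : List Int) (h : p1.length ≤ p2.length) :
    pvCombine op p1 p2
      = List.zipWith (fun a b =>
          if op = '=' then (if a = b then 1 else 0)
          else if op = '>' then (if (a, b) = ((1 : Int), (0 : Int)) then 0 else 1)
          else if op = '&' then (if (a, b) = ((1 : Int), (1 : Int)) then 1 else 0)
          else (if a = 1 ∨ b = 1 then (1 : Int) else 0)) p1 p2 := by
  induction p1 generalizing p2 with
  | nil => simp [pvCombine]
  | cons a xs ih =>
    cases p2 with
    | nil => simp at h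
    | cons b ys => simp [pvCombine, ih ys (by simpa using h)]

-- ===== VERDICT =====
theorem evaluate_operators_spec : Claim_equal_evaluate_operators := by
  intro s idx p1 p2 pv _ hpre
  obtain ⟨-, hlen⟩ := hpre
  unfold Spec_evaluate_operators evaluate_operators evaluate_operators_alt
  cases hc : PySem.Str.pyGet? s idx with
  | none => rfl
  | some c =>
    by_cases hA : c = '&'
    · subst hA
      have hl := hlen (by rw [hc]; decide)
      dsimp only
      rw [if_pos (by tauto), if_pos rfl, if_pos (Or.inl rfl), pv_fold_ite,
          pv_map_range_eq_zipWith (fun a b => if a = 1 ∧ b = 1 then 1 else 0) p1 p2 hl,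
          pv_combine_eq_zipWith '&' p1 p2 hl,
          show (fun a b : Int => if a = 1 ∧ b = 1 then (1 : Int) else 0)
              = fun a b : Int => if (a, b) = ((1 : Int), (1 : Int)) then 1 else 0 from
            funext fun a => funext fun b => by simp [Prod.ext_iff]]
      simp
    by_cases hO : c = '|'
    · subst hO
      have hl := hlen (by rw [hc]; decide)
      dsimp only
      rw [if_pos (by tauto), if_neg hA, if_pos rfl, if_pos (by tauto), pv_fold_ite,
          pv_map_range_eq_zipWith (fun a b => if a = 1 ∨ b = 1 then 1 else 0) p1 p2 hl,
          pv_combine_eq_zipWith '|' p1 p2 hl]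
      simp
    by_cases hI : c = '>'
    · subst hI
      have hl := hlen (by rw [hc]; decide)
      dsimp only
      rw [if_pos (by tauto), if_neg hA, if_neg hO, if_pos rfl, if_pos (by tauto), pv_fold_ite,
          pv_map_range_eq_zipWith (fun a b => if a = 1 ∧ b = 0 then 0 else 1) p1 p2 hl,
          pv_combine_eq_zipWith '>' p1 p2 hl,
          show (fun a b : Int => if a = 1 ∧ b = 0 then (0 : Int) else 1)
              = fun a b : Int => if (a, b) = ((1 : Int), (0 : Int)) then 0 else 1 from
            funext fun a => funext fun b => by simp [Prod.ext_iff]]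
      simp
    by_cases hE : c = '='
    · subst hE
      have hl := hlen (by rw [hc]; decide)
      dsimp only
      rw [if_pos (by tauto), if_neg hA, if_neg hO, if_neg hI, if_pos rfl, if_pos (by tauto), pv_fold_ite,
          pv_map_range_eq_zipWith (fun a b => if a = b then 1 else 0) p1 p2 hl,
          pv_combine_eq_zipWith '=' p1 p2 hl]
      simp
    · simp [hA, hO, hI, hE]
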